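-- pv_equiv track=rewrite | github.com/KimRasak/Paper | preprocess/data_helper.py | get_unique_ids
-- ===== SOURCE A (Python) =====
-- def get_unique_ids(data: dict):
--     # Read and return the unique ids of users/playlists/tracks
--     unique_uids = set(data.keys())
--     unique_pids = set()
--     unique_tids = set()
--     interactions_num = 0
--
--     for uid, user in data.items():
--         for pid, tids in user.items():
--             unique_pids.add(pid)
--             for tid in tids:
--                 interactions_num += 1
--                 unique_tids.add(tid)
--     return unique_uids, unique_pids, unique_tids, interactions_num
-- ===== SOURCE B (Python) =====
-- def get_unique_ids(data: dict):
--     # Read and return the unique ids of users/playlists/tracks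
--     # Divide and conquer over the users: solve each half recursively,
--     # merge with set unions and a count addition.
--     items = list(data.items())
--
--     def solve(lo, hi):
--         if hi - lo == 0:
--             return set(), set(), 0
--         if hi - lo == 1:
--             user = items[lo][1]
--             pids = set(user)
--             tids = set().union(*user.values())
--             cnt = sum(map(len, user.values()))
--             return pids, tids, cnt
--         mid = (lo + hi) // 2
--         lp, lt, lc = solve(lo, mid)
--         rp, rt, rc = solve(mid, hi)
--         return lp | rp, lt | rt, lc + rc
--
--     pids, tids, cnt = solve(0, len(items))
--     return set(data), pids, tids, cnt
-- ===== Notes on version B (the rewrite author's own statement) =====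
-- stated objective: alternative
-- what changed: Replaced the single fused triple-nested loop with four accumulators by a divide-and-conquer recursion over the list of users that solves each half independently and merges the halves with set unions and a count addition.
import Mathlib
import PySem

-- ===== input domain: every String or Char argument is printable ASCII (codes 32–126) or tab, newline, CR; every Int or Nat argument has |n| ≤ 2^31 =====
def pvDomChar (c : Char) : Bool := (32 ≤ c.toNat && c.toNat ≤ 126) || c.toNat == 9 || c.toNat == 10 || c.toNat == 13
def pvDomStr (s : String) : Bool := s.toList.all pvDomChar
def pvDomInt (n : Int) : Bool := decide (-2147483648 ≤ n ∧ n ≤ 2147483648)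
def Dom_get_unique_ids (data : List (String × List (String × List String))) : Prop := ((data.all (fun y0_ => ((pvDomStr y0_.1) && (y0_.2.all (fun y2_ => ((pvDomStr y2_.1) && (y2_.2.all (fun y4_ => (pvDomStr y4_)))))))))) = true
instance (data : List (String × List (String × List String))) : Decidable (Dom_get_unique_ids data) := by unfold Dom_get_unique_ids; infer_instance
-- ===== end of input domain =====

-- B replaces A's single fused triple-nested loop by a divide-and-conquer recursion over
-- the users, merging half-results with set unions and a count addition; same cost, an alternative shape.

-- ===== PORT A =====
def get_unique_ids (data : List (String × List (String × List String))) : List String × List String × List String × Int :=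
  let unique_uids : PySem.Set String := PySem.Set.ofList (data.map Prod.fst)
  let r := data.foldl
    (fun (st : PySem.Set String × PySem.Set String × Int) u =>
      u.2.foldl
        (fun st2 p =>
          p.2.foldl
            (fun st3 tid => (st3.1, PySem.Set.add st3.2.1 tid, st3.2.2 + 1))
            (PySem.Set.add st2.1 p.1, st2.2))
        st)
    (PySem.Set.empty, PySem.Set.empty, (0 : Int))
  (unique_uids, r.1, r.2.1, r.2.2)

-- ===== PORT B =====
-- solve(lo, hi) of Source B: divide and conquer over items[lo:hi]
def altSolve (items : List (String × List (String × List String))) (lo hi : Nat) :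
    PySem.Set String × PySem.Set String × Int :=
  if hi - lo = 0 then (PySem.Set.empty, PySem.Set.empty, (0 : Int))
  else if hi - lo = 1 then
    let user := (items.getD lo ("", [])).2
    (PySem.Set.ofList (user.map Prod.fst),
     PySem.Set.ofList (user.flatMap Prod.snd),
     (user.map (fun p => (p.2.length : Int))).sum)
  else
    let mid := (lo + hi) / 2
    let l := altSolve items lo mid
    let r := altSolve items mid hi
    (PySem.Set.union l.1 r.1, PySem.Set.union l.2.1 r.2.1, l.2.2 + r.2.2)
  termination_by hi - lo
  decreasing_by all_goals omega

def get_unique_ids_alt (data : List (String × List (String × List String))) : List String × List String × List String × Int :=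
  let s := altSolve data 0 data.length
  (PySem.Set.ofList (data.map Prod.fst), s.1, s.2.1, s.2.2)

-- ===== PRECONDITION & SPEC =====
def Spec_get_unique_ids (data : List (String × List (String × List String))) (out : List String × List String × List String × Int) : Prop := out = get_unique_ids_alt data
instance (data : List (String × List (String × List String))) (out : List String × List String × List String × Int) : Decidable (Spec_get_unique_ids data out) := by unfold Spec_get_unique_ids; infer_instance

-- ===== CLAIM (what is proved, stated in full; the proofs are below) =====
def Claim_equal_get_unique_ids : Prop := ∀ (data : List (String × List (String × List String))), Dom_get_unique_ids data → Spec_get_unique_ids data (get_unique_ids data)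

-- ===== LEMMAS AND PROOFS =====

-- set union with a built set absorbs the inner ofList
lemma union_ofList {α : Type} [BEq α] [LawfulBEq α] (s : PySem.Set α) (ys : List α) :
    PySem.Set.union s (PySem.Set.ofList ys) = PySem.Set.update s ys := by
  show PySem.Set.update s (PySem.Set.ofList ys) = PySem.Set.update s ys
  rw [PySem.Set.update_eq_append_filter, PySem.Set.update_eq_append_filter,
    PySem.Set.ofList_ofList]

-- the sequential aggregate of a block of users
def seqAgg (l : List (String × List (String × List String))) :
    PySem.Set String × PySem.Set String × Int :=
  (PySem.Set.ofList (l.flatMap (fun u => u.2.map Prod.fst)),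
   PySem.Set.ofList (l.flatMap (fun u => u.2.flatMap Prod.snd)),
   (l.flatMap (fun u => u.2.map (fun p => (p.2.length : Int)))).sum)

-- the divide-and-conquer recursion computes the sequential aggregate of its slice
lemma altSolve_eq (items : List (String × List (String × List String))) :
    ∀ (n lo hi : Nat), hi - lo = n → lo ≤ hi → hi ≤ items.length →
      altSolve items lo hi = seqAgg ((items.drop lo).take (hi - lo)) := by
  intro n
  induction n using Nat.strong_induction_on with
  | _ n ih =>
    intro lo hi hn hle hlen
    rw [altSolve]
    by_cases h0 : hi - lo = 0
    · simp [h0, seqAgg, PySem.Set.empty]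
    · by_cases h1 : hi - lo = 1
      · have hlt : lo < items.length := by omega
        have hdrop : items.drop lo = items[lo] :: items.drop (lo + 1) :=
          List.drop_eq_getElem_cons hlt
        simp only [h1, if_true, hdrop, List.take_succ_cons, List.take_zero]
        simp [seqAgg, hlt]
      · simp only [h0, h1, if_false]
        have hmidlo : lo < (lo + hi) / 2 := by omega
        have hmidhi : (lo + hi) / 2 < hi := by omega
        rw [ih ((lo + hi) / 2 - lo) (by omega) lo ((lo + hi) / 2) rfl (by omega) (by omega),
            ih (hi - (lo + hi) / 2) (by omega) ((lo + hi) / 2) hi rfl (by omega) hlen]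
        have hsplit : (items.drop lo).take (hi - lo)
            = (items.drop lo).take ((lo + hi) / 2 - lo)
              ++ (items.drop ((lo + hi) / 2)).take (hi - (lo + hi) / 2) := by
          rw [show hi - lo = ((lo + hi) / 2 - lo) + (hi - (lo + hi) / 2) by omega,
              List.take_add, List.drop_drop,
              show lo + ((lo + hi) / 2 - lo) = (lo + hi) / 2 by omega]
        rw [hsplit]
        simp only [seqAgg, List.flatMap_append, List.sum_append,
          PySem.Set.ofList_append, union_ofList]

-- A's innermost loop over the tids of one playlist
lemma loopTids (tids : List String) (st : PySem.Set String × PySem.Set String × Int) :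
    tids.foldl (fun st3 tid => (st3.1, PySem.Set.add st3.2.1 tid, st3.2.2 + 1)) st
      = (st.1, PySem.Set.update st.2.1 tids, st.2.2 + (tids.length : Int)) := by
  induction tids generalizing st with
  | nil => simp [PySem.Set.update]
  | cons t ts ih =>
    rw [List.foldl_cons, ih]
    refine Prod.ext rfl (Prod.ext ?_ ?_)
    · simp [PySem.Set.update]
    · simp; ring

-- A's middle loop over one user's playlists
lemma loopUser (user : List (String × List String)) (st : PySem.Set String × PySem.Set String × Int) :
    user.foldl
      (fun st2 p =>
        p.2.foldl (fun st3 tid => (st3.1, PySem.Set.add st3.2.1 tid, st3.2.2 + 1))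
          (PySem.Set.add st2.1 p.1, st2.2)) st
      = (PySem.Set.update st.1 (user.map Prod.fst),
         PySem.Set.update st.2.1 (user.flatMap (fun p => p.2)),
         st.2.2 + (user.map (fun p => (p.2.length : Int))).sum) := by
  induction user generalizing st with
  | nil => simp [PySem.Set.update]
  | cons p ps ih =>
    rw [List.foldl_cons, loopTids, ih]
    simp only [List.map_cons, List.flatMap_cons, List.sum_cons]
    refine Prod.ext ?_ (Prod.ext ?_ ?_)
    · simp [PySem.Set.update]
    · simp [PySem.Set.update, List.foldl_append]
    · simp; omega

-- A's outer loop over the users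
lemma loopData (data : List (String × List (String × List String)))
    (st : PySem.Set String × PySem.Set String × Int) :
    data.foldl
      (fun st u =>
        u.2.foldl
          (fun st2 p =>
            p.2.foldl (fun st3 tid => (st3.1, PySem.Set.add st3.2.1 tid, st3.2.2 + 1))
              (PySem.Set.add st2.1 p.1, st2.2)) st) st
      = (PySem.Set.update st.1 (data.flatMap (fun u => u.2.map Prod.fst)),
         PySem.Set.update st.2.1 (data.flatMap (fun u => u.2.flatMap (fun p => p.2))),
         st.2.2 + (data.flatMap (fun u => u.2.map (fun p => (p.2.length : Int)))).sum) := by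
  induction data generalizing st with
  | nil => simp [PySem.Set.update]
  | cons u us ih =>
    rw [List.foldl_cons, loopUser, ih]
    simp only [List.flatMap_cons, List.sum_append]
    refine Prod.ext ?_ (Prod.ext ?_ ?_)
    · simp [PySem.Set.update, List.foldl_append]
    · simp [PySem.Set.update, List.foldl_append]
    · simp; omega

-- ===== VERDICT (by name: the statement is the Claim_ definition above) =====
theorem get_unique_ids_spec : Claim_equal_get_unique_ids := by
  intro data _
  unfold Spec_get_unique_ids get_unique_ids get_unique_ids_alt
  rw [altSolve_eq data (data.length - 0) 0 data.length rfl (Nat.zero_le _) le_rfl]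
  simp only [loopData, List.drop_zero, Nat.sub_zero, List.take_length, seqAgg]
  refine Prod.ext rfl (Prod.ext ?_ (Prod.ext ?_ ?_)) <;>
    simp [PySem.Set.update, PySem.Set.ofList, PySem.Set.empty]
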